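-- pv_equiv track=rewrite | github.com/NCAR/jazzparamgen | jazzparamgencolors.py | set_cmap
-- ===== SOURCE A (Python) =====
-- def set_cmap(layername):
--
--   coldict = {'ltg_strikes_gray.colors':['Ltg_Strikes'],
--              'ltg_distance.colors':['Ltg_Distance'],
--              'dist_to_obs_km.colors':['DIST_TO_CBH','DIST_TO_ZR','DIST_TO_CC','DIST_TO_ZL','DIST_TO_ZR','DIST_TO_IP','DIST_TO_RN',\
--                                       'DIST_TO_SN','DIST_TO_DZ','DIST_TO_TH','DIST_2_LGHT'],
--              'cloud_base_height_m.colors':['CLD_BASE_HGT','CLOUD_BASE_HGT'],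
--              'cloud_cover_cat.colors':['CLOUD_COVER'],
--              'cbh_conf.colors':['CBH_CONF'],
--              'precip_conf.colors':['PRECIP_CONF'],
--              'cape_j_kg.colors':['CAPE'],
--              'cin_j_kg.colors':['CIN'],
--              'geopot_height_gpm.colors':['HGT','geop_ht'],
--              'pressure_pa.colors':['PRES'],
--              'vvel_pa_s.colors':['VVEL','vert_wind'],
--              'condensate_kg_kg.colors':['CLWMR','ICMR','SNMR','GRMR','RWMR','clw','rnw','ice','snow','graupel'],
--              'mixing_ratio_kg_kg.colors':['MIXR','Q','ciwc','clwc','spec_hum','SPECH'],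
--              'temp_K.colors':['TMP','TEMP','VPTMP','DEW_PT_TEMP','WET_BULB_TEMP','LCL_TEMP','TK','IN_CLOUD_TEMP','air_temp'],
--              'model_precip_kg_m2.colors':['ACPCP1hr','ACPCP1Hr','NCPCP1hr','NCPCP1Hr','ACPCP2hr','ACPCP2Hr','NCPCP2hr','NCPCP2Hr','ACPCP3hr',\
--                                           'ACPCP3Hr','NCPCP3hr','NCPCP3Hr','ACPCP','NCPCP','MODEL_PRECIP','accum_ls_prcp','accum_conv_prcp'],
--              'theta_e_K.colors':['THETA_E'],
--              'rh_per.colors':['RH','IN_CLOUD_RH'],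
--              'condensate_g_kg.colors':['ICE_COND','LIQ_COND','SLW','SUP_COOL_WTR','PRECIP_COND','SLW_COMP','TOTAL_COND'],
--              'tot_wtr_path_g_m2.colors':['TOT_WATER_PATH'],
--              'k_index.colors':['K_INDEX'],
--              'lifted_index.colors':['LIFTED_INDEX'],
--              'total_totals.colors':['TOTAL_TOTALS'],
--              'pirep_interest.colors':['PIREP_INTEREST','PIREP_INTRT'],
--              'shum.colors':['PIREP_WEIGHT'],
--              'lcref.colors':['cref','lcref'],
--              'dbz_pct.colors':['VIP>=1','VIP==1','VIP==2','VIP==3','VIP==4','VIP==5','VIP==6','DBZ_75_PCTL','DBZ_25_PCTL','R75','VIPGE1'],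
--              'sat_albedo.colors':['VISIBLE','NORM_ALBEDO','visible','albedo','VIS_1','VIS_2'],
--              'sat_temp2.colors':['IR','SW_IR','SWIR','C08_BT','C09_BT','C10_BT','C11_BT','C13_BT','C15_BT'],
--              'sat_zenith.colors':['SAT_ZENITH'],
--              'sun_zenith.colors':['SUN_ZENITH'],
--              'rel_azimuth.colors':['REL_AZIMUTH'],
--              'sw_refl.colors':['SW_REFL'],
--              'sat_ch2m4.colors':['IR2-IR4','IR2_IR4'],
--              'cip_ice_sld_sev_percent.colors':['ICE','ICE_PROB','SLD','SLD_COMP','ICE_COMP','ICE_SEV','ICE_SEV_COMP','ICE_PROB_COMP',\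
--                                                'PROB_NIGHT_ADJU','PROB_VIS_ADJUST','ICE_SLD','ICE_SEV','SEV_TEMP_DAMP','SEV_CTT_DAMP',\
--                                                'SEV_REFLECT_DAMP','SEV_VIS_DAMP','SEV_NIGHT_ADJUS'],
--              'cip_sevcat.colors':['ICE_SEV_CAT'],
--              'cip_cnt.colors':['CNT','CLOUD_LAYER_NUM','NLAYERS'],
--              'cip_interest_maps.colors':['TEMP_MAP','THUNDER_MAP','RH_MAP','CTT_MAP','VV_MAP','SLW_MAP','PIREP_MAP','BWN_TMAP','MMAP'],
--              'cip_k_level.colors':['CTL','CBL','CBK','WNHGT','CBK-2D','LAYER_TOP_K','LAYER_BASE_K','CTK-2D','WARMNOSE','BOUNDARY_LYR','PIREP_COUNT'],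
--              'cloud_thickness_m.colors':['CLD'],
--              'zp.colors':['ZP'],
--              'allsno.colors':['ALLSNO','ONLYSNO'],
--              'cloud_top_height_m.colors':['CLD_TOP_HGT','CLOUD_TOP_HGT'],
--              'warmnose_height_m.colors':['WARMNOSE_HGT'],
--              'fip_sev_scenarios.colors':['SCENARIO'],
--              'algo_ctt_sat.colors':['CTT','CTT-2D','CTT_2D'],
--              'CipAlgo_prob_scenarios.colors':['PROB_SCENARIO','POT_SCENARIO'],
--              'CipAlgo_sev_scenarios.colors':['SEV_SCENARIO'],
--              'CipAlgo_sld_scenarios.colors':['SLD_SCENARIO'],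
--              'CipAlgo_warnings.colors':['WARNINGS'],
--              'fip_sev_scenarios.xml':['FIP_SEV_SCENARIO'],
--              'fip_surf_precip.xml':['SURF_PRECIP'],
--              'sat_ice_idx.colors':['SAT_ICE_IDX'],
--              'micro_g_m3.colors':['DQ'],
--              'sat_refl.colors':['C04_REFL','C05_REFL','C06_REFL'],
--              'topo.colors':['TOPO','topog'],
--              'general_categorical_eight.xml':['ACTP'],
--              'goes_16_l2_cod.colors':['COD'],
--              'goes_16_l2_cps.colors':['CPS'],
--              'radarkdp.xml':['MKDP','MeanKDP','sdevKDP','KDP'],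
--              'radarrhohv.xml':['MRHOHV','RHOHV'],
--              'radardbz.xml':['MREF','MeanDBZ','MeanDBZ_MIXPHA','MeanDBZ_PLATES','sdevDBZ','TDBZ','LCREF','REFL'],
--              'radarzdr.xml':['MZDR','MeanZDR_PLATES','MeanZDR_MIZPHA','MeanZDR','sdevZDR','ZDR'],
--              'radia_interest.colors':['MIXPHA','PLATES','FRZDRZ'],
--              'decision.colors':['DECISION','decision'],
--              'tiles.colors':['TILENUM']
--   }
--
--   # Initialize the cmapname
--   cmapname = 'sat_temp2.colors'
--
--   # Handle some special cases
--   if layername[:4] == 'IMAP' or layername[-4:] == '_INT' or layername[-9:] == '_interest' or layername[-4:] == '_MAP' or layername[-4:] == '_ADJ':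
--     cmapname = 'cip_interest_maps.colors'
--   else:
--     # Loop over each item in the dictionary and return the colormap for the layername requested
--     for k,v in coldict.items():
--       if layername in v:
--         cmapname = k
--
--   # Return the colormap
--   return(cmapname)
-- ===== SOURCE B (Python) =====
-- def set_cmap(layername):
--
--   # Special cases: interest-map style layer names
--   if layername.startswith('IMAP') or layername.endswith(('_INT', '_interest', '_MAP', '_ADJ')):
--     return 'cip_interest_maps.colors'
--
--   # Direct lookup in a flat, precomputed name -> colormap table (one entry per
--   # layer name; the original table has no conflicting duplicates, so this is
--   # exactly its last-match-wins scan), defaulting to 'sat_temp2.colors'.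
--   return _NAME_TO_CMAP.get(layername, 'sat_temp2.colors')
--
--
-- _NAME_TO_CMAP = {
--   'Ltg_Strikes': 'ltg_strikes_gray.colors',
--   'Ltg_Distance': 'ltg_distance.colors',
--   'DIST_TO_CBH': 'dist_to_obs_km.colors',
--   'DIST_TO_ZR': 'dist_to_obs_km.colors',
--   'DIST_TO_CC': 'dist_to_obs_km.colors',
--   'DIST_TO_ZL': 'dist_to_obs_km.colors',
--   'DIST_TO_IP': 'dist_to_obs_km.colors',
--   'DIST_TO_RN': 'dist_to_obs_km.colors',
--   'DIST_TO_SN': 'dist_to_obs_km.colors',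
--   'DIST_TO_DZ': 'dist_to_obs_km.colors',
--   'DIST_TO_TH': 'dist_to_obs_km.colors',
--   'DIST_2_LGHT': 'dist_to_obs_km.colors',
--   'CLD_BASE_HGT': 'cloud_base_height_m.colors',
--   'CLOUD_BASE_HGT': 'cloud_base_height_m.colors',
--   'CLOUD_COVER': 'cloud_cover_cat.colors',
--   'CBH_CONF': 'cbh_conf.colors',
--   'PRECIP_CONF': 'precip_conf.colors',
--   'CAPE': 'cape_j_kg.colors',
--   'CIN': 'cin_j_kg.colors',
--   'HGT': 'geopot_height_gpm.colors',
--   'geop_ht': 'geopot_height_gpm.colors',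
--   'PRES': 'pressure_pa.colors',
--   'VVEL': 'vvel_pa_s.colors',
--   'vert_wind': 'vvel_pa_s.colors',
--   'CLWMR': 'condensate_kg_kg.colors',
--   'ICMR': 'condensate_kg_kg.colors',
--   'SNMR': 'condensate_kg_kg.colors',
--   'GRMR': 'condensate_kg_kg.colors',
--   'RWMR': 'condensate_kg_kg.colors',
--   'clw': 'condensate_kg_kg.colors',
--   'rnw': 'condensate_kg_kg.colors',
--   'ice': 'condensate_kg_kg.colors',
--   'snow': 'condensate_kg_kg.colors',
--   'graupel': 'condensate_kg_kg.colors',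
--   'MIXR': 'mixing_ratio_kg_kg.colors',
--   'Q': 'mixing_ratio_kg_kg.colors',
--   'ciwc': 'mixing_ratio_kg_kg.colors',
--   'clwc': 'mixing_ratio_kg_kg.colors',
--   'spec_hum': 'mixing_ratio_kg_kg.colors',
--   'SPECH': 'mixing_ratio_kg_kg.colors',
--   'TMP': 'temp_K.colors',
--   'TEMP': 'temp_K.colors',
--   'VPTMP': 'temp_K.colors',
--   'DEW_PT_TEMP': 'temp_K.colors',
--   'WET_BULB_TEMP': 'temp_K.colors',
--   'LCL_TEMP': 'temp_K.colors',
--   'TK': 'temp_K.colors',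
--   'IN_CLOUD_TEMP': 'temp_K.colors',
--   'air_temp': 'temp_K.colors',
--   'ACPCP1hr': 'model_precip_kg_m2.colors',
--   'ACPCP1Hr': 'model_precip_kg_m2.colors',
--   'NCPCP1hr': 'model_precip_kg_m2.colors',
--   'NCPCP1Hr': 'model_precip_kg_m2.colors',
--   'ACPCP2hr': 'model_precip_kg_m2.colors',
--   'ACPCP2Hr': 'model_precip_kg_m2.colors',
--   'NCPCP2hr': 'model_precip_kg_m2.colors',
--   'NCPCP2Hr': 'model_precip_kg_m2.colors',
--   'ACPCP3hr': 'model_precip_kg_m2.colors',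
--   'ACPCP3Hr': 'model_precip_kg_m2.colors',
--   'NCPCP3hr': 'model_precip_kg_m2.colors',
--   'NCPCP3Hr': 'model_precip_kg_m2.colors',
--   'ACPCP': 'model_precip_kg_m2.colors',
--   'NCPCP': 'model_precip_kg_m2.colors',
--   'MODEL_PRECIP': 'model_precip_kg_m2.colors',
--   'accum_ls_prcp': 'model_precip_kg_m2.colors',
--   'accum_conv_prcp': 'model_precip_kg_m2.colors',
--   'THETA_E': 'theta_e_K.colors',
--   'RH': 'rh_per.colors',
--   'IN_CLOUD_RH': 'rh_per.colors',
--   'ICE_COND': 'condensate_g_kg.colors',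
--   'LIQ_COND': 'condensate_g_kg.colors',
--   'SLW': 'condensate_g_kg.colors',
--   'SUP_COOL_WTR': 'condensate_g_kg.colors',
--   'PRECIP_COND': 'condensate_g_kg.colors',
--   'SLW_COMP': 'condensate_g_kg.colors',
--   'TOTAL_COND': 'condensate_g_kg.colors',
--   'TOT_WATER_PATH': 'tot_wtr_path_g_m2.colors',
--   'K_INDEX': 'k_index.colors',
--   'LIFTED_INDEX': 'lifted_index.colors',
--   'TOTAL_TOTALS': 'total_totals.colors',
--   'PIREP_INTEREST': 'pirep_interest.colors',
--   'PIREP_INTRT': 'pirep_interest.colors',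
--   'PIREP_WEIGHT': 'shum.colors',
--   'cref': 'lcref.colors',
--   'lcref': 'lcref.colors',
--   'VIP>=1': 'dbz_pct.colors',
--   'VIP==1': 'dbz_pct.colors',
--   'VIP==2': 'dbz_pct.colors',
--   'VIP==3': 'dbz_pct.colors',
--   'VIP==4': 'dbz_pct.colors',
--   'VIP==5': 'dbz_pct.colors',
--   'VIP==6': 'dbz_pct.colors',
--   'DBZ_75_PCTL': 'dbz_pct.colors',
--   'DBZ_25_PCTL': 'dbz_pct.colors',
--   'R75': 'dbz_pct.colors',
--   'VIPGE1': 'dbz_pct.colors',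
--   'VISIBLE': 'sat_albedo.colors',
--   'NORM_ALBEDO': 'sat_albedo.colors',
--   'visible': 'sat_albedo.colors',
--   'albedo': 'sat_albedo.colors',
--   'VIS_1': 'sat_albedo.colors',
--   'VIS_2': 'sat_albedo.colors',
--   'IR': 'sat_temp2.colors',
--   'SW_IR': 'sat_temp2.colors',
--   'SWIR': 'sat_temp2.colors',
--   'C08_BT': 'sat_temp2.colors',
--   'C09_BT': 'sat_temp2.colors',
--   'C10_BT': 'sat_temp2.colors',
--   'C11_BT': 'sat_temp2.colors',
--   'C13_BT': 'sat_temp2.colors',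
--   'C15_BT': 'sat_temp2.colors',
--   'SAT_ZENITH': 'sat_zenith.colors',
--   'SUN_ZENITH': 'sun_zenith.colors',
--   'REL_AZIMUTH': 'rel_azimuth.colors',
--   'SW_REFL': 'sw_refl.colors',
--   'IR2-IR4': 'sat_ch2m4.colors',
--   'IR2_IR4': 'sat_ch2m4.colors',
--   'ICE': 'cip_ice_sld_sev_percent.colors',
--   'ICE_PROB': 'cip_ice_sld_sev_percent.colors',
--   'SLD': 'cip_ice_sld_sev_percent.colors',
--   'SLD_COMP': 'cip_ice_sld_sev_percent.colors',
--   'ICE_COMP': 'cip_ice_sld_sev_percent.colors',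
--   'ICE_SEV': 'cip_ice_sld_sev_percent.colors',
--   'ICE_SEV_COMP': 'cip_ice_sld_sev_percent.colors',
--   'ICE_PROB_COMP': 'cip_ice_sld_sev_percent.colors',
--   'PROB_NIGHT_ADJU': 'cip_ice_sld_sev_percent.colors',
--   'PROB_VIS_ADJUST': 'cip_ice_sld_sev_percent.colors',
--   'ICE_SLD': 'cip_ice_sld_sev_percent.colors',
--   'SEV_TEMP_DAMP': 'cip_ice_sld_sev_percent.colors',
--   'SEV_CTT_DAMP': 'cip_ice_sld_sev_percent.colors',
--   'SEV_REFLECT_DAMP': 'cip_ice_sld_sev_percent.colors',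
--   'SEV_VIS_DAMP': 'cip_ice_sld_sev_percent.colors',
--   'SEV_NIGHT_ADJUS': 'cip_ice_sld_sev_percent.colors',
--   'ICE_SEV_CAT': 'cip_sevcat.colors',
--   'CNT': 'cip_cnt.colors',
--   'CLOUD_LAYER_NUM': 'cip_cnt.colors',
--   'NLAYERS': 'cip_cnt.colors',
--   'TEMP_MAP': 'cip_interest_maps.colors',
--   'THUNDER_MAP': 'cip_interest_maps.colors',
--   'RH_MAP': 'cip_interest_maps.colors',
--   'CTT_MAP': 'cip_interest_maps.colors',
--   'VV_MAP': 'cip_interest_maps.colors',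
--   'SLW_MAP': 'cip_interest_maps.colors',
--   'PIREP_MAP': 'cip_interest_maps.colors',
--   'BWN_TMAP': 'cip_interest_maps.colors',
--   'MMAP': 'cip_interest_maps.colors',
--   'CTL': 'cip_k_level.colors',
--   'CBL': 'cip_k_level.colors',
--   'CBK': 'cip_k_level.colors',
--   'WNHGT': 'cip_k_level.colors',
--   'CBK-2D': 'cip_k_level.colors',
--   'LAYER_TOP_K': 'cip_k_level.colors',
--   'LAYER_BASE_K': 'cip_k_level.colors',
--   'CTK-2D': 'cip_k_level.colors',
--   'WARMNOSE': 'cip_k_level.colors',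
--   'BOUNDARY_LYR': 'cip_k_level.colors',
--   'PIREP_COUNT': 'cip_k_level.colors',
--   'CLD': 'cloud_thickness_m.colors',
--   'ZP': 'zp.colors',
--   'ALLSNO': 'allsno.colors',
--   'ONLYSNO': 'allsno.colors',
--   'CLD_TOP_HGT': 'cloud_top_height_m.colors',
--   'CLOUD_TOP_HGT': 'cloud_top_height_m.colors',
--   'WARMNOSE_HGT': 'warmnose_height_m.colors',
--   'SCENARIO': 'fip_sev_scenarios.colors',
--   'CTT': 'algo_ctt_sat.colors',
--   'CTT-2D': 'algo_ctt_sat.colors',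
--   'CTT_2D': 'algo_ctt_sat.colors',
--   'PROB_SCENARIO': 'CipAlgo_prob_scenarios.colors',
--   'POT_SCENARIO': 'CipAlgo_prob_scenarios.colors',
--   'SEV_SCENARIO': 'CipAlgo_sev_scenarios.colors',
--   'SLD_SCENARIO': 'CipAlgo_sld_scenarios.colors',
--   'WARNINGS': 'CipAlgo_warnings.colors',
--   'FIP_SEV_SCENARIO': 'fip_sev_scenarios.xml',
--   'SURF_PRECIP': 'fip_surf_precip.xml',
--   'SAT_ICE_IDX': 'sat_ice_idx.colors',
--   'DQ': 'micro_g_m3.colors',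
--   'C04_REFL': 'sat_refl.colors',
--   'C05_REFL': 'sat_refl.colors',
--   'C06_REFL': 'sat_refl.colors',
--   'TOPO': 'topo.colors',
--   'topog': 'topo.colors',
--   'ACTP': 'general_categorical_eight.xml',
--   'COD': 'goes_16_l2_cod.colors',
--   'CPS': 'goes_16_l2_cps.colors',
--   'MKDP': 'radarkdp.xml',
--   'MeanKDP': 'radarkdp.xml',
--   'sdevKDP': 'radarkdp.xml',
--   'KDP': 'radarkdp.xml',
--   'MRHOHV': 'radarrhohv.xml',
--   'RHOHV': 'radarrhohv.xml',
--   'MREF': 'radardbz.xml',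
--   'MeanDBZ': 'radardbz.xml',
--   'MeanDBZ_MIXPHA': 'radardbz.xml',
--   'MeanDBZ_PLATES': 'radardbz.xml',
--   'sdevDBZ': 'radardbz.xml',
--   'TDBZ': 'radardbz.xml',
--   'LCREF': 'radardbz.xml',
--   'REFL': 'radardbz.xml',
--   'MZDR': 'radarzdr.xml',
--   'MeanZDR_PLATES': 'radarzdr.xml',
--   'MeanZDR_MIZPHA': 'radarzdr.xml',
--   'MeanZDR': 'radarzdr.xml',
--   'sdevZDR': 'radarzdr.xml',
--   'ZDR': 'radarzdr.xml',
--   'MIXPHA': 'radia_interest.colors',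
--   'PLATES': 'radia_interest.colors',
--   'FRZDRZ': 'radia_interest.colors',
--   'DECISION': 'decision.colors',
--   'decision': 'decision.colors',
--   'TILENUM': 'tiles.colors',
-- }
-- ===== Notes on version B (the rewrite author's own statement) =====
-- stated objective: simpler
-- what changed: B replaces the nested name-list scan with a direct lookup in a flat precomputed name-to-colormap table (one entry per layer name, correct because the original table has no conflicting duplicate names), and uses startswith/endswith instead of slicing for the special cases.
import Mathlib
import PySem

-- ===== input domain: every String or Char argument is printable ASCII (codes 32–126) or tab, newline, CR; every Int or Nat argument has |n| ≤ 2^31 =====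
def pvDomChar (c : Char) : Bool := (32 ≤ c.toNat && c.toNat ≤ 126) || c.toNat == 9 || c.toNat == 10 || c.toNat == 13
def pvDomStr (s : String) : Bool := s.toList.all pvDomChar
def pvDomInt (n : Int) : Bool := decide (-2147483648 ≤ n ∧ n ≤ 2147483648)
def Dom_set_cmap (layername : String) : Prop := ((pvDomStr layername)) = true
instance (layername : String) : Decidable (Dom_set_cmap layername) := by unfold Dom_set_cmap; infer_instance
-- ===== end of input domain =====

-- ===== PORT A =====
-- B is simpler: a direct lookup in a flat, precomputed name->colormap table replaces
-- the nested last-match-wins scan (the original table has no conflicting duplicate names).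
-- A's literal colormap table (Python dict literal with distinct keys, so iterating
-- coldict.items() is iterating this association list in order).
def pvColdict : List (String × List String) := [
  ("ltg_strikes_gray.colors", ["Ltg_Strikes"]),
  ("ltg_distance.colors", ["Ltg_Distance"]),
  ("dist_to_obs_km.colors", ["DIST_TO_CBH", "DIST_TO_ZR", "DIST_TO_CC", "DIST_TO_ZL", "DIST_TO_ZR", "DIST_TO_IP", "DIST_TO_RN", "DIST_TO_SN", "DIST_TO_DZ", "DIST_TO_TH", "DIST_2_LGHT"]),
  ("cloud_base_height_m.colors", ["CLD_BASE_HGT", "CLOUD_BASE_HGT"]),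
  ("cloud_cover_cat.colors", ["CLOUD_COVER"]),
  ("cbh_conf.colors", ["CBH_CONF"]),
  ("precip_conf.colors", ["PRECIP_CONF"]),
  ("cape_j_kg.colors", ["CAPE"]),
  ("cin_j_kg.colors", ["CIN"]),
  ("geopot_height_gpm.colors", ["HGT", "geop_ht"]),
  ("pressure_pa.colors", ["PRES"]),
  ("vvel_pa_s.colors", ["VVEL", "vert_wind"]),
  ("condensate_kg_kg.colors", ["CLWMR", "ICMR", "SNMR", "GRMR", "RWMR", "clw", "rnw", "ice", "snow", "graupel"]),
  ("mixing_ratio_kg_kg.colors", ["MIXR", "Q", "ciwc", "clwc", "spec_hum", "SPECH"]),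
  ("temp_K.colors", ["TMP", "TEMP", "VPTMP", "DEW_PT_TEMP", "WET_BULB_TEMP", "LCL_TEMP", "TK", "IN_CLOUD_TEMP", "air_temp"]),
  ("model_precip_kg_m2.colors", ["ACPCP1hr", "ACPCP1Hr", "NCPCP1hr", "NCPCP1Hr", "ACPCP2hr", "ACPCP2Hr", "NCPCP2hr", "NCPCP2Hr", "ACPCP3hr", "ACPCP3Hr", "NCPCP3hr", "NCPCP3Hr", "ACPCP", "NCPCP", "MODEL_PRECIP", "accum_ls_prcp", "accum_conv_prcp"]),
  ("theta_e_K.colors", ["THETA_E"]),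
  ("rh_per.colors", ["RH", "IN_CLOUD_RH"]),
  ("condensate_g_kg.colors", ["ICE_COND", "LIQ_COND", "SLW", "SUP_COOL_WTR", "PRECIP_COND", "SLW_COMP", "TOTAL_COND"]),
  ("tot_wtr_path_g_m2.colors", ["TOT_WATER_PATH"]),
  ("k_index.colors", ["K_INDEX"]),
  ("lifted_index.colors", ["LIFTED_INDEX"]),
  ("total_totals.colors", ["TOTAL_TOTALS"]),
  ("pirep_interest.colors", ["PIREP_INTEREST", "PIREP_INTRT"]),
  ("shum.colors", ["PIREP_WEIGHT"]),
  ("lcref.colors", ["cref", "lcref"]),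
  ("dbz_pct.colors", ["VIP>=1", "VIP==1", "VIP==2", "VIP==3", "VIP==4", "VIP==5", "VIP==6", "DBZ_75_PCTL", "DBZ_25_PCTL", "R75", "VIPGE1"]),
  ("sat_albedo.colors", ["VISIBLE", "NORM_ALBEDO", "visible", "albedo", "VIS_1", "VIS_2"]),
  ("sat_temp2.colors", ["IR", "SW_IR", "SWIR", "C08_BT", "C09_BT", "C10_BT", "C11_BT", "C13_BT", "C15_BT"]),
  ("sat_zenith.colors", ["SAT_ZENITH"]),
  ("sun_zenith.colors", ["SUN_ZENITH"]),
  ("rel_azimuth.colors", ["REL_AZIMUTH"]),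
  ("sw_refl.colors", ["SW_REFL"]),
  ("sat_ch2m4.colors", ["IR2-IR4", "IR2_IR4"]),
  ("cip_ice_sld_sev_percent.colors", ["ICE", "ICE_PROB", "SLD", "SLD_COMP", "ICE_COMP", "ICE_SEV", "ICE_SEV_COMP", "ICE_PROB_COMP", "PROB_NIGHT_ADJU", "PROB_VIS_ADJUST", "ICE_SLD", "ICE_SEV", "SEV_TEMP_DAMP", "SEV_CTT_DAMP", "SEV_REFLECT_DAMP", "SEV_VIS_DAMP", "SEV_NIGHT_ADJUS"]),
  ("cip_sevcat.colors", ["ICE_SEV_CAT"]),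
  ("cip_cnt.colors", ["CNT", "CLOUD_LAYER_NUM", "NLAYERS"]),
  ("cip_interest_maps.colors", ["TEMP_MAP", "THUNDER_MAP", "RH_MAP", "CTT_MAP", "VV_MAP", "SLW_MAP", "PIREP_MAP", "BWN_TMAP", "MMAP"]),
  ("cip_k_level.colors", ["CTL", "CBL", "CBK", "WNHGT", "CBK-2D", "LAYER_TOP_K", "LAYER_BASE_K", "CTK-2D", "WARMNOSE", "BOUNDARY_LYR", "PIREP_COUNT"]),
  ("cloud_thickness_m.colors", ["CLD"]),
  ("zp.colors", ["ZP"]),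
  ("allsno.colors", ["ALLSNO", "ONLYSNO"]),
  ("cloud_top_height_m.colors", ["CLD_TOP_HGT", "CLOUD_TOP_HGT"]),
  ("warmnose_height_m.colors", ["WARMNOSE_HGT"]),
  ("fip_sev_scenarios.colors", ["SCENARIO"]),
  ("algo_ctt_sat.colors", ["CTT", "CTT-2D", "CTT_2D"]),
  ("CipAlgo_prob_scenarios.colors", ["PROB_SCENARIO", "POT_SCENARIO"]),
  ("CipAlgo_sev_scenarios.colors", ["SEV_SCENARIO"]),
  ("CipAlgo_sld_scenarios.colors", ["SLD_SCENARIO"]),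
  ("CipAlgo_warnings.colors", ["WARNINGS"]),
  ("fip_sev_scenarios.xml", ["FIP_SEV_SCENARIO"]),
  ("fip_surf_precip.xml", ["SURF_PRECIP"]),
  ("sat_ice_idx.colors", ["SAT_ICE_IDX"]),
  ("micro_g_m3.colors", ["DQ"]),
  ("sat_refl.colors", ["C04_REFL", "C05_REFL", "C06_REFL"]),
  ("topo.colors", ["TOPO", "topog"]),
  ("general_categorical_eight.xml", ["ACTP"]),
  ("goes_16_l2_cod.colors", ["COD"]),
  ("goes_16_l2_cps.colors", ["CPS"]),
  ("radarkdp.xml", ["MKDP", "MeanKDP", "sdevKDP", "KDP"]),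
  ("radarrhohv.xml", ["MRHOHV", "RHOHV"]),
  ("radardbz.xml", ["MREF", "MeanDBZ", "MeanDBZ_MIXPHA", "MeanDBZ_PLATES", "sdevDBZ", "TDBZ", "LCREF", "REFL"]),
  ("radarzdr.xml", ["MZDR", "MeanZDR_PLATES", "MeanZDR_MIZPHA", "MeanZDR", "sdevZDR", "ZDR"]),
  ("radia_interest.colors", ["MIXPHA", "PLATES", "FRZDRZ"]),
  ("decision.colors", ["DECISION", "decision"]),
  ("tiles.colors", ["TILENUM"])]


-- Port of A: the special-case slice tests, else the last-match-wins scan over the table.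
def set_cmap (layername : String) : String :=
  if PySem.Str.slice layername none (some 4) = "IMAP" ∨
     PySem.Str.slice layername (some (-4)) none = "_INT" ∨
     PySem.Str.slice layername (some (-9)) none = "_interest" ∨
     PySem.Str.slice layername (some (-4)) none = "_MAP" ∨
     PySem.Str.slice layername (some (-4)) none = "_ADJ" then
    "cip_interest_maps.colors"
  else
    pvColdict.foldl (fun cmapname kv => if layername ∈ kv.2 then kv.1 else cmapname)
      "sat_temp2.colors"

-- ===== PORT B =====
-- B's flat precomputed table: one entry per layer name (Source B's _NAME_TO_CMAP literal).
def pvFlatTable : PySem.Dict String String := ⟨[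
  ("Ltg_Strikes", "ltg_strikes_gray.colors"),
  ("Ltg_Distance", "ltg_distance.colors"),
  ("DIST_TO_CBH", "dist_to_obs_km.colors"),
  ("DIST_TO_ZR", "dist_to_obs_km.colors"),
  ("DIST_TO_CC", "dist_to_obs_km.colors"),
  ("DIST_TO_ZL", "dist_to_obs_km.colors"),
  ("DIST_TO_IP", "dist_to_obs_km.colors"),
  ("DIST_TO_RN", "dist_to_obs_km.colors"),
  ("DIST_TO_SN", "dist_to_obs_km.colors"),
  ("DIST_TO_DZ", "dist_to_obs_km.colors"),
  ("DIST_TO_TH", "dist_to_obs_km.colors"),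
  ("DIST_2_LGHT", "dist_to_obs_km.colors"),
  ("CLD_BASE_HGT", "cloud_base_height_m.colors"),
  ("CLOUD_BASE_HGT", "cloud_base_height_m.colors"),
  ("CLOUD_COVER", "cloud_cover_cat.colors"),
  ("CBH_CONF", "cbh_conf.colors"),
  ("PRECIP_CONF", "precip_conf.colors"),
  ("CAPE", "cape_j_kg.colors"),
  ("CIN", "cin_j_kg.colors"),
  ("HGT", "geopot_height_gpm.colors"),
  ("geop_ht", "geopot_height_gpm.colors"),
  ("PRES", "pressure_pa.colors"),
  ("VVEL", "vvel_pa_s.colors"),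
  ("vert_wind", "vvel_pa_s.colors"),
  ("CLWMR", "condensate_kg_kg.colors"),
  ("ICMR", "condensate_kg_kg.colors"),
  ("SNMR", "condensate_kg_kg.colors"),
  ("GRMR", "condensate_kg_kg.colors"),
  ("RWMR", "condensate_kg_kg.colors"),
  ("clw", "condensate_kg_kg.colors"),
  ("rnw", "condensate_kg_kg.colors"),
  ("ice", "condensate_kg_kg.colors"),
  ("snow", "condensate_kg_kg.colors"),
  ("graupel", "condensate_kg_kg.colors"),
  ("MIXR", "mixing_ratio_kg_kg.colors"),
  ("Q", "mixing_ratio_kg_kg.colors"),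
  ("ciwc", "mixing_ratio_kg_kg.colors"),
  ("clwc", "mixing_ratio_kg_kg.colors"),
  ("spec_hum", "mixing_ratio_kg_kg.colors"),
  ("SPECH", "mixing_ratio_kg_kg.colors"),
  ("TMP", "temp_K.colors"),
  ("TEMP", "temp_K.colors"),
  ("VPTMP", "temp_K.colors"),
  ("DEW_PT_TEMP", "temp_K.colors"),
  ("WET_BULB_TEMP", "temp_K.colors"),
  ("LCL_TEMP", "temp_K.colors"),
  ("TK", "temp_K.colors"),
  ("IN_CLOUD_TEMP", "temp_K.colors"),
  ("air_temp", "temp_K.colors"),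
  ("ACPCP1hr", "model_precip_kg_m2.colors"),
  ("ACPCP1Hr", "model_precip_kg_m2.colors"),
  ("NCPCP1hr", "model_precip_kg_m2.colors"),
  ("NCPCP1Hr", "model_precip_kg_m2.colors"),
  ("ACPCP2hr", "model_precip_kg_m2.colors"),
  ("ACPCP2Hr", "model_precip_kg_m2.colors"),
  ("NCPCP2hr", "model_precip_kg_m2.colors"),
  ("NCPCP2Hr", "model_precip_kg_m2.colors"),
  ("ACPCP3hr", "model_precip_kg_m2.colors"),
  ("ACPCP3Hr", "model_precip_kg_m2.colors"),
  ("NCPCP3hr", "model_precip_kg_m2.colors"),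
  ("NCPCP3Hr", "model_precip_kg_m2.colors"),
  ("ACPCP", "model_precip_kg_m2.colors"),
  ("NCPCP", "model_precip_kg_m2.colors"),
  ("MODEL_PRECIP", "model_precip_kg_m2.colors"),
  ("accum_ls_prcp", "model_precip_kg_m2.colors"),
  ("accum_conv_prcp", "model_precip_kg_m2.colors"),
  ("THETA_E", "theta_e_K.colors"),
  ("RH", "rh_per.colors"),
  ("IN_CLOUD_RH", "rh_per.colors"),
  ("ICE_COND", "condensate_g_kg.colors"),
  ("LIQ_COND", "condensate_g_kg.colors"),
  ("SLW", "condensate_g_kg.colors"),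
  ("SUP_COOL_WTR", "condensate_g_kg.colors"),
  ("PRECIP_COND", "condensate_g_kg.colors"),
  ("SLW_COMP", "condensate_g_kg.colors"),
  ("TOTAL_COND", "condensate_g_kg.colors"),
  ("TOT_WATER_PATH", "tot_wtr_path_g_m2.colors"),
  ("K_INDEX", "k_index.colors"),
  ("LIFTED_INDEX", "lifted_index.colors"),
  ("TOTAL_TOTALS", "total_totals.colors"),
  ("PIREP_INTEREST", "pirep_interest.colors"),
  ("PIREP_INTRT", "pirep_interest.colors"),
  ("PIREP_WEIGHT", "shum.colors"),
  ("cref", "lcref.colors"),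
  ("lcref", "lcref.colors"),
  ("VIP>=1", "dbz_pct.colors"),
  ("VIP==1", "dbz_pct.colors"),
  ("VIP==2", "dbz_pct.colors"),
  ("VIP==3", "dbz_pct.colors"),
  ("VIP==4", "dbz_pct.colors"),
  ("VIP==5", "dbz_pct.colors"),
  ("VIP==6", "dbz_pct.colors"),
  ("DBZ_75_PCTL", "dbz_pct.colors"),
  ("DBZ_25_PCTL", "dbz_pct.colors"),
  ("R75", "dbz_pct.colors"),
  ("VIPGE1", "dbz_pct.colors"),
  ("VISIBLE", "sat_albedo.colors"),
  ("NORM_ALBEDO", "sat_albedo.colors"),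
  ("visible", "sat_albedo.colors"),
  ("albedo", "sat_albedo.colors"),
  ("VIS_1", "sat_albedo.colors"),
  ("VIS_2", "sat_albedo.colors"),
  ("IR", "sat_temp2.colors"),
  ("SW_IR", "sat_temp2.colors"),
  ("SWIR", "sat_temp2.colors"),
  ("C08_BT", "sat_temp2.colors"),
  ("C09_BT", "sat_temp2.colors"),
  ("C10_BT", "sat_temp2.colors"),
  ("C11_BT", "sat_temp2.colors"),
  ("C13_BT", "sat_temp2.colors"),
  ("C15_BT", "sat_temp2.colors"),
  ("SAT_ZENITH", "sat_zenith.colors"),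
  ("SUN_ZENITH", "sun_zenith.colors"),
  ("REL_AZIMUTH", "rel_azimuth.colors"),
  ("SW_REFL", "sw_refl.colors"),
  ("IR2-IR4", "sat_ch2m4.colors"),
  ("IR2_IR4", "sat_ch2m4.colors"),
  ("ICE", "cip_ice_sld_sev_percent.colors"),
  ("ICE_PROB", "cip_ice_sld_sev_percent.colors"),
  ("SLD", "cip_ice_sld_sev_percent.colors"),
  ("SLD_COMP", "cip_ice_sld_sev_percent.colors"),
  ("ICE_COMP", "cip_ice_sld_sev_percent.colors"),
  ("ICE_SEV", "cip_ice_sld_sev_percent.colors"),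
  ("ICE_SEV_COMP", "cip_ice_sld_sev_percent.colors"),
  ("ICE_PROB_COMP", "cip_ice_sld_sev_percent.colors"),
  ("PROB_NIGHT_ADJU", "cip_ice_sld_sev_percent.colors"),
  ("PROB_VIS_ADJUST", "cip_ice_sld_sev_percent.colors"),
  ("ICE_SLD", "cip_ice_sld_sev_percent.colors"),
  ("SEV_TEMP_DAMP", "cip_ice_sld_sev_percent.colors"),
  ("SEV_CTT_DAMP", "cip_ice_sld_sev_percent.colors"),
  ("SEV_REFLECT_DAMP", "cip_ice_sld_sev_percent.colors"),
  ("SEV_VIS_DAMP", "cip_ice_sld_sev_percent.colors"),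
  ("SEV_NIGHT_ADJUS", "cip_ice_sld_sev_percent.colors"),
  ("ICE_SEV_CAT", "cip_sevcat.colors"),
  ("CNT", "cip_cnt.colors"),
  ("CLOUD_LAYER_NUM", "cip_cnt.colors"),
  ("NLAYERS", "cip_cnt.colors"),
  ("TEMP_MAP", "cip_interest_maps.colors"),
  ("THUNDER_MAP", "cip_interest_maps.colors"),
  ("RH_MAP", "cip_interest_maps.colors"),
  ("CTT_MAP", "cip_interest_maps.colors"),
  ("VV_MAP", "cip_interest_maps.colors"),
  ("SLW_MAP", "cip_interest_maps.colors"),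
  ("PIREP_MAP", "cip_interest_maps.colors"),
  ("BWN_TMAP", "cip_interest_maps.colors"),
  ("MMAP", "cip_interest_maps.colors"),
  ("CTL", "cip_k_level.colors"),
  ("CBL", "cip_k_level.colors"),
  ("CBK", "cip_k_level.colors"),
  ("WNHGT", "cip_k_level.colors"),
  ("CBK-2D", "cip_k_level.colors"),
  ("LAYER_TOP_K", "cip_k_level.colors"),
  ("LAYER_BASE_K", "cip_k_level.colors"),
  ("CTK-2D", "cip_k_level.colors"),
  ("WARMNOSE", "cip_k_level.colors"),
  ("BOUNDARY_LYR", "cip_k_level.colors"),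
  ("PIREP_COUNT", "cip_k_level.colors"),
  ("CLD", "cloud_thickness_m.colors"),
  ("ZP", "zp.colors"),
  ("ALLSNO", "allsno.colors"),
  ("ONLYSNO", "allsno.colors"),
  ("CLD_TOP_HGT", "cloud_top_height_m.colors"),
  ("CLOUD_TOP_HGT", "cloud_top_height_m.colors"),
  ("WARMNOSE_HGT", "warmnose_height_m.colors"),
  ("SCENARIO", "fip_sev_scenarios.colors"),
  ("CTT", "algo_ctt_sat.colors"),
  ("CTT-2D", "algo_ctt_sat.colors"),
  ("CTT_2D", "algo_ctt_sat.colors"),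
  ("PROB_SCENARIO", "CipAlgo_prob_scenarios.colors"),
  ("POT_SCENARIO", "CipAlgo_prob_scenarios.colors"),
  ("SEV_SCENARIO", "CipAlgo_sev_scenarios.colors"),
  ("SLD_SCENARIO", "CipAlgo_sld_scenarios.colors"),
  ("WARNINGS", "CipAlgo_warnings.colors"),
  ("FIP_SEV_SCENARIO", "fip_sev_scenarios.xml"),
  ("SURF_PRECIP", "fip_surf_precip.xml"),
  ("SAT_ICE_IDX", "sat_ice_idx.colors"),
  ("DQ", "micro_g_m3.colors"),
  ("C04_REFL", "sat_refl.colors"),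
  ("C05_REFL", "sat_refl.colors"),
  ("C06_REFL", "sat_refl.colors"),
  ("TOPO", "topo.colors"),
  ("topog", "topo.colors"),
  ("ACTP", "general_categorical_eight.xml"),
  ("COD", "goes_16_l2_cod.colors"),
  ("CPS", "goes_16_l2_cps.colors"),
  ("MKDP", "radarkdp.xml"),
  ("MeanKDP", "radarkdp.xml"),
  ("sdevKDP", "radarkdp.xml"),
  ("KDP", "radarkdp.xml"),
  ("MRHOHV", "radarrhohv.xml"),
  ("RHOHV", "radarrhohv.xml"),
  ("MREF", "radardbz.xml"),
  ("MeanDBZ", "radardbz.xml"),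
  ("MeanDBZ_MIXPHA", "radardbz.xml"),
  ("MeanDBZ_PLATES", "radardbz.xml"),
  ("sdevDBZ", "radardbz.xml"),
  ("TDBZ", "radardbz.xml"),
  ("LCREF", "radardbz.xml"),
  ("REFL", "radardbz.xml"),
  ("MZDR", "radarzdr.xml"),
  ("MeanZDR_PLATES", "radarzdr.xml"),
  ("MeanZDR_MIZPHA", "radarzdr.xml"),
  ("MeanZDR", "radarzdr.xml"),
  ("sdevZDR", "radarzdr.xml"),
  ("ZDR", "radarzdr.xml"),
  ("MIXPHA", "radia_interest.colors"),
  ("PLATES", "radia_interest.colors"),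
  ("FRZDRZ", "radia_interest.colors"),
  ("DECISION", "decision.colors"),
  ("decision", "decision.colors"),
  ("TILENUM", "tiles.colors")]⟩


-- Port of B: startswith/endswith special cases (the Python endswith takes a tuple = this
-- disjunction), else one lookup in the flat table with the default.
def set_cmap_alt (layername : String) : String :=
  if PySem.Str.startswith layername "IMAP" ||
     PySem.Str.endswith layername "_INT" ||
     PySem.Str.endswith layername "_interest" ||
     PySem.Str.endswith layername "_MAP" ||
     PySem.Str.endswith layername "_ADJ" then
    "cip_interest_maps.colors"
  else
    pvFlatTable.getD layername "sat_temp2.colors"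

-- ===== PRECONDITION & SPEC =====
def Spec_set_cmap (layername : String) (out : String) : Prop := out = set_cmap_alt layername
instance (layername : String) (out : String) : Decidable (Spec_set_cmap layername out) := by unfold Spec_set_cmap; infer_instance

-- ===== CLAIM (what is proved, stated in full; the proofs are below) =====
def Claim_equal_set_cmap : Prop := ∀ (layername : String), Dom_set_cmap layername → Spec_set_cmap layername (set_cmap layername)

-- ===== LEMMAS AND PROOFS =====

-- A's slice-prefix test equals B's startswith.
theorem pv_prefix_iff (s p : String) :
    PySem.Str.slice s none (some (p.toList.length : Int)) = p ↔ PySem.Str.startswith s p = true := by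
  rw [String.ext_iff, PySem.Str.toList_slice, PySem.Chars.slice_eq_listSlice,
      PySem.List.slice_to_natCast, PySem.Str.startswith_eq, PySem.Chars.startswith_iff,
      List.prefix_iff_eq_take, eq_comm]

-- A's slice-suffix test equals B's endswith.
theorem pv_suffix_iff (s p : String) (hp : p.toList ≠ []) :
    PySem.Str.slice s (some (-(p.toList.length : Int))) none = p ↔ PySem.Str.endswith s p = true := by
  rw [String.ext_iff, PySem.Str.toList_slice, PySem.Chars.slice_eq_listSlice,
      PySem.List.slice_from_neg_natCast _ _ (by simpa using List.length_pos_iff.mpr hp),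
      PySem.Str.endswith_eq, PySem.Chars.endswith_iff, List.suffix_iff_eq_drop, eq_comm]

-- A's whole special-case condition equals B's.
theorem pv_cond_iff (L : String) :
    (PySem.Str.slice L none (some 4) = "IMAP" ∨
     PySem.Str.slice L (some (-4)) none = "_INT" ∨
     PySem.Str.slice L (some (-9)) none = "_interest" ∨
     PySem.Str.slice L (some (-4)) none = "_MAP" ∨
     PySem.Str.slice L (some (-4)) none = "_ADJ") ↔
    (PySem.Str.startswith L "IMAP" || PySem.Str.endswith L "_INT" ||
     PySem.Str.endswith L "_interest" || PySem.Str.endswith L "_MAP" ||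
     PySem.Str.endswith L "_ADJ") = true := by
  have h1 := pv_prefix_iff L "IMAP"
  have h2 := pv_suffix_iff L "_INT" (by decide)
  have h3 := pv_suffix_iff L "_interest" (by decide)
  have h4 := pv_suffix_iff L "_MAP" (by decide)
  have h5 := pv_suffix_iff L "_ADJ" (by decide)
  simp only [show (("IMAP":String).toList.length : Int) = 4 from by decide,
             show (("_INT":String).toList.length : Int) = 4 from by decide,
             show (("_interest":String).toList.length : Int) = 9 from by decide,
             show (("_MAP":String).toList.length : Int) = 4 from by decide,
             show (("_ADJ":String).toList.length : Int) = 4 from by decide] at h1 h2 h3 h4 h5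
  rw [h1, h2, h3, h4, h5]
  simp only [Bool.or_eq_true, or_assoc]

-- Inner loop of the reverse-index construction: inserting every name of v with value k.
theorem pv_inner (v : List String) (k L dflt : String) (d : PySem.Dict String String) :
    (v.foldl (fun d n => d.insert n k) d).getD L dflt
      = if L ∈ v then k else d.getD L dflt := by
  induction v generalizing d with
  | nil => simp
  | cons n v ih =>
    simp only [List.foldl_cons, ih, List.mem_cons, PySem.Dict.getD_insert]
    by_cases hL : L ∈ v
    · simp [hL]
    · by_cases hn : L = n <;> simp [hL, hn]

-- A's last-match-wins scan equals a lookup in the dict built by successive inserts.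
theorem pv_outer (xs : List (String × List String)) (L dflt : String)
    (d : PySem.Dict String String) :
    (xs.foldl (fun d kv => kv.2.foldl (fun d n => d.insert n kv.1) d) d).getD L dflt
      = xs.foldl (fun acc kv => if L ∈ kv.2 then kv.1 else acc) (d.getD L dflt) := by
  induction xs generalizing d with
  | nil => rfl
  | cons kv xs ih => simp only [List.foldl_cons, ih, pv_inner]

set_option maxRecDepth 4000 in
-- The dict built by inserting every (name, colormap) of A's table is exactly B's
-- flat literal table (a closed computation checked by the kernel).
theorem pv_built_eq_flat :
    pvColdict.foldl (fun d kv => kv.2.foldl (fun d n => d.insert n kv.1) d)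
      PySem.Dict.empty = pvFlatTable := by
  rw [PySem.Dict.ext_iff]; decide

-- ===== VERDICT (by name: the statement is the Claim_ definition above) =====
theorem set_cmap_spec : Claim_equal_set_cmap := by
  intro L _
  unfold Spec_set_cmap set_cmap set_cmap_alt
  by_cases hc : PySem.Str.slice L none (some 4) = "IMAP" ∨
     PySem.Str.slice L (some (-4)) none = "_INT" ∨
     PySem.Str.slice L (some (-9)) none = "_interest" ∨
     PySem.Str.slice L (some (-4)) none = "_MAP" ∨
     PySem.Str.slice L (some (-4)) none = "_ADJ"
  · rw [if_pos hc, if_pos ((pv_cond_iff L).mp hc)]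
  · rw [if_neg hc, if_neg (fun h => hc ((pv_cond_iff L).mpr h)),
        ← pv_built_eq_flat, pv_outer, PySem.Dict.getD_empty]
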